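-- pv_equiv track=rewrite | github.com/amineshx/leetcode | 731. My Calendar II.py | simulate_my_calendar
-- ===== SOURCE A (Python) =====
-- class MyCalendarTwo:
--
--     def __init__(self):
--         self.intersection=[]
--         self.non_intersecton=[]
--
--     def book(self, start: int, end: int) -> bool:
--         for i,j in self.intersection:
--             if end > i and start < j :
--                 return False
--
--         for i,j in self.non_intersecton:
--             if end > i and start < j :
--                 interval = (max(i,start), min(j,end))
--                 self.intersection.append(interval)
--         self.non_intersecton.append((start,end))
--         return True
--
-- def simulate_my_calendar(commands, inputs):
--     output = []
--     myCalendar = None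
--
--     for i, command in enumerate(commands):
--         if command == "MyCalendarTwo":
--             myCalendar = MyCalendarTwo()
--             output.append(None)
--         elif command == "book":
--             start, end = inputs[i]
--             result = myCalendar.book(start, end)
--             output.append(result)
--
--     return output
-- ===== SOURCE B (Python) =====
-- def _has_triple(accepted, s, e):
--     # does (s,e) overlap the pairwise intersection of two distinct accepted bookings?
--     seen = []
--     for (sk, ek) in accepted:
--         for (im, jm) in seen:
--             if ek > im and sk < jm and e > max(im, sk) and s < min(jm, ek):
--                 return True
--         seen.append((sk, ek))
--     return False
--
--
-- def simulate_my_calendar(commands, inputs):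
--     output = []
--     accepted = None
--     for i, command in enumerate(commands):
--         if command == "MyCalendarTwo":
--             accepted = []
--             output.append(None)
--         elif command == "book":
--             s, e = inputs[i]
--             if _has_triple(accepted, s, e):
--                 output.append(False)
--             else:
--                 accepted.append((s, e))
--                 output.append(True)
--     return output
-- ===== Notes on version B (the rewrite author's own statement) =====
-- stated objective: alternative
-- what changed: B drops A's incrementally maintained list of pairwise intersections (O(n^2) memory) and keeps only the accepted bookings, detecting a triple overlap by testing the new booking against the pairwise intersection of each earlier pair computed on the fly.
import Mathlib
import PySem

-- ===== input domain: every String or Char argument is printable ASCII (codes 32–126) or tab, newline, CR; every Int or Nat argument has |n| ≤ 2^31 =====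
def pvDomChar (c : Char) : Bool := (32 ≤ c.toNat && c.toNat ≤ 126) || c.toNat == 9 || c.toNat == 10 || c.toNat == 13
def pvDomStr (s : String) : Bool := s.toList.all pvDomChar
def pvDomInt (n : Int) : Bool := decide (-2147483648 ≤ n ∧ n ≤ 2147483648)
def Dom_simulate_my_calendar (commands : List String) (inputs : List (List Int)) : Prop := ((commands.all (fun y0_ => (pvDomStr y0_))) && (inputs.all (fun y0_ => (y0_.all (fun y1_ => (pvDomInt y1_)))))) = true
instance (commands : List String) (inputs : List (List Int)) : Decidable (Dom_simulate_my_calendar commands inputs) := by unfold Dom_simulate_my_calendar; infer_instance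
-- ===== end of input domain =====

-- B keeps only the accepted bookings (O(n) memory) and recomputes pairwise
-- intersections on the fly, instead of A's maintained intersection list.

-- ===== PORT A =====
-- A's state: (intersection, non_intersecton).  book(start,end):
def pvBookA (st : List (Int × Int) × List (Int × Int)) (s e : Int) :
    Bool × (List (Int × Int) × List (Int × Int)) :=
  -- for i,j in self.intersection: if end > i and start < j: return False
  if st.1.any (fun p => decide (e > p.1) && decide (s < p.2)) then (false, st)
  else
    -- for i,j in self.non_intersecton: if overlap: intersection.append((max,min))
    let inter := st.2.foldl (fun acc p =>
      if e > p.1 ∧ s < p.2 then acc ++ [(max p.1 s, min p.2 e)] else acc) st.1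
    (true, (inter, st.2 ++ [(s, e)]))

-- the enumerate loop: inputs[i] = head of the remaining inputs (each step drops one);
-- a book with no calendar or a malformed inputs[i] raises in Python (excluded by Pre_).
def pvSimA : List String → List (List Int) →
    Option (List (Int × Int) × List (Int × Int)) → List (Option Bool)
  | [], _, _ => []
  | c :: cs, ins, st =>
    if c = "MyCalendarTwo" then
      none :: pvSimA cs ins.tail (some ([], []))
    else if c = "book" then
      match st, ins.head? with
      | some stv, some [s, e] =>
        let r := pvBookA stv s e
        some r.1 :: pvSimA cs ins.tail (some r.2)
      | _, _ => none :: pvSimA cs ins.tail st   -- Python raises here; outside Pre_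
    else
      pvSimA cs ins.tail st

def simulate_my_calendar (commands : List String) (inputs : List (List Int)) : List (Option Bool) :=
  pvSimA commands inputs none

-- ===== PORT B =====
-- _has_triple: inner 'for (im,jm) in seen' with early return = seen.any; seen grows by appending
def pvHasTriple : List (Int × Int) → List (Int × Int) → Int → Int → Bool
  | [], _, _, _ => false
  | b :: rest, seen, s, e =>
    if seen.any (fun p => decide (b.2 > p.1) && decide (b.1 < p.2) &&
        decide (e > max p.1 b.1) && decide (s < min p.2 b.2)) then true
    else pvHasTriple rest (seen ++ [b]) s e

def pvBookB (acc : List (Int × Int)) (s e : Int) : Bool × List (Int × Int) :=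
  if pvHasTriple acc [] s e then (false, acc) else (true, acc ++ [(s, e)])

def pvSimB : List String → List (List Int) → Option (List (Int × Int)) → List (Option Bool)
  | [], _, _ => []
  | c :: cs, ins, st =>
    if c = "MyCalendarTwo" then
      none :: pvSimB cs ins.tail (some [])
    else if c = "book" then
      match st, ins.head? with
      | some acc, some [s, e] =>
        let r := pvBookB acc s e
        some r.1 :: pvSimB cs ins.tail (some r.2)
      | _, _ => none :: pvSimB cs ins.tail st   -- Python raises here; outside Pre_
    else
      pvSimB cs ins.tail st

def simulate_my_calendar_alt (commands : List String) (inputs : List (List Int)) : List (Option Bool) :=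
  pvSimB commands inputs none

-- ===== PRECONDITION & SPEC =====
-- Pre_ = exactly the inputs on which Python A returns: every "book" occurs after some
-- "MyCalendarTwo" (else AttributeError), within inputs' range, and inputs[i] has exactly
-- two elements (else IndexError / unpacking ValueError).
def Pre_simulate_my_calendar (commands : List String) (inputs : List (List Int)) : Prop :=
  ∀ i : Nat, i < commands.length → commands.getD i "" = "book" →
    ((∃ j : Nat, j < i ∧ commands.getD j "" = "MyCalendarTwo") ∧
     i < inputs.length ∧ (inputs.getD i []).length = 2)
instance (commands : List String) (inputs : List (List Int)) : Decidable (Pre_simulate_my_calendar commands inputs) := by unfold Pre_simulate_my_calendar; infer_instance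

def pvWitness_simulate_my_calendar : List String × List (List Int) :=
  (["MyCalendarTwo", "book", "book", "book"], [[0, 0], [10, 20], [15, 25], [16, 18]])

def Spec_simulate_my_calendar (commands : List String) (inputs : List (List Int)) (out : List (Option Bool)) : Prop := out = simulate_my_calendar_alt commands inputs
instance (commands : List String) (inputs : List (List Int)) (out : List (Option Bool)) : Decidable (Spec_simulate_my_calendar commands inputs out) := by unfold Spec_simulate_my_calendar; infer_instance

-- ===== CLAIM (what is proved, stated in full; the proofs are below) =====
def Claim_equal_simulate_my_calendar : Prop := ∀ (commands : List String) (inputs : List (List Int)), Dom_simulate_my_calendar commands inputs → Pre_simulate_my_calendar commands inputs → Spec_simulate_my_calendar commands inputs (simulate_my_calendar commands inputs)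

-- ===== LEMMAS AND PROOFS =====

-- pairwise intersections of `seen` with a new booking b, in A's append order
def pvInters : List (Int × Int) → (Int × Int) → List (Int × Int)
  | [], _ => []
  | p :: rest, b =>
    (if b.2 > p.1 ∧ b.1 < p.2 then [(max p.1 b.1, min p.2 b.2)] else []) ++ pvInters rest b

-- A's full intersection list determined by the accepted bookings (with prefix `seen`)
def pvFlatD : List (Int × Int) → List (Int × Int) → List (Int × Int)
  | _, [] => []
  | seen, b :: rest => pvInters seen b ++ pvFlatD (seen ++ [b]) rest

theorem pvFoldl_inters (l : List (Int × Int)) (s e : Int) (init : List (Int × Int)) :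
    l.foldl (fun acc p =>
      if e > p.1 ∧ s < p.2 then acc ++ [(max p.1 s, min p.2 e)] else acc) init
      = init ++ pvInters l (s, e) := by
  induction l generalizing init with
  | nil => simp [pvInters]
  | cons p rest ih =>
    simp only [List.foldl, pvInters]
    split_ifs with h <;> simp [ih]

theorem pvFlatD_snoc (acc : List (Int × Int)) (seen : List (Int × Int)) (b : Int × Int) :
    pvFlatD seen (acc ++ [b]) = pvFlatD seen acc ++ pvInters (seen ++ acc) b := by
  induction acc generalizing seen with
  | nil => simp [pvFlatD]
  | cons a rest ih =>
    simp only [List.cons_append, pvFlatD, ih (seen ++ [a]), List.append_assoc]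
    simp

theorem pvInters_any (seen : List (Int × Int)) (b : Int × Int) (s e : Int) :
    (pvInters seen b).any (fun p => decide (e > p.1) && decide (s < p.2))
      = seen.any (fun p => decide (b.2 > p.1) && decide (b.1 < p.2) &&
          decide (e > max p.1 b.1) && decide (s < min p.2 b.2)) := by
  induction seen with
  | nil => simp [pvInters]
  | cons p rest ih =>
    simp only [pvInters, List.any_append, List.any_cons, ih]
    split_ifs with h
    · simp [h.1, h.2, Bool.and_assoc]
    · rcases Decidable.not_and_iff_not_or_not.mp h with h1 | h1 <;>
        simp [h1]

theorem pvHasTriple_eq (acc seen : List (Int × Int)) (s e : Int) :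
    pvHasTriple acc seen s e
      = (pvFlatD seen acc).any (fun p => decide (e > p.1) && decide (s < p.2)) := by
  induction acc generalizing seen with
  | nil => simp [pvHasTriple, pvFlatD]
  | cons b rest ih =>
    simp only [pvHasTriple, pvFlatD, List.any_append, ih, pvInters_any]
    split_ifs with h
    · rw [h, Bool.true_or]
    · rw [Bool.not_eq_true] at h
      rw [h, Bool.false_or]

theorem pvSim_eq (cs : List String) (ins : List (List Int))
    (st : Option (List (Int × Int))) :
    pvSimA cs ins (st.map (fun a => (pvFlatD [] a, a))) = pvSimB cs ins st := by
  induction cs generalizing ins st with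
  | nil => simp [pvSimA, pvSimB]
  | cons c rest ih =>
    simp only [pvSimA, pvSimB]
    split_ifs with hc hb
    · have := ih ins.tail (some [])
      simpa [pvFlatD] using this
    · cases st with
      | none => simpa using ih ins.tail none
      | some acc =>
        cases hin : ins.head? with
        | none => simpa using ih ins.tail (some acc)
        | some v =>
          match v with
          | [] => simpa using ih ins.tail (some acc)
          | [s] => simpa using ih ins.tail (some acc)
          | s :: e :: x :: t => simpa using ih ins.tail (some acc)
          | [s, e] =>
            simp only [pvBookA, pvBookB, Option.map_some]
            rw [pvHasTriple_eq acc [] s e]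
            split_ifs with ht
            · simpa using ih ins.tail (some acc)
            · have h2 : pvFlatD [] acc ++ pvInters acc (s, e) = pvFlatD [] (acc ++ [(s, e)]) := by
                rw [pvFlatD_snoc acc [] (s, e)]; simp
              have := ih ins.tail (some (acc ++ [(s, e)]))
              simp only [Option.map_some] at this
              simp only [pvFoldl_inters, h2, this]
    · exact ih ins.tail st

-- ===== VERDICT (by name: the statement is the Claim_ definition above) =====
theorem simulate_my_calendar_spec : Claim_equal_simulate_my_calendar := by
  intro commands inputs _ _
  unfold Spec_simulate_my_calendar simulate_my_calendar simulate_my_calendar_alt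
  simpa using pvSim_eq commands inputs none
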